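-- pv_equiv track=rewrite | github.com/amith-2001/avocado_and_host | back-end/unified_2host.py | parse_dialogue
-- ===== SOURCE A (Python) =====
-- def parse_dialogue(text):
--     lines = text.split('\n')
--     parsed_dialogue = []
--     current_speaker = None
--     current_text = ""
--
--     for line in lines:
--         if line.startswith("Alex:") or line.startswith("Jamie:"):
--             if current_speaker:
--                 parsed_dialogue.append((current_speaker, current_text.strip(), "nova" if current_speaker == "Alex" else "echo"))
--             current_speaker = line.split(':')[0]
--             current_text = line.split(':', 1)[1].strip()
--         else:
--             current_text += " " + line.strip()
--
--     if current_speaker: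
--         parsed_dialogue.append((current_speaker, current_text.strip(), "nova" if current_speaker == "Alex" else "echo"))
--
--     return parsed_dialogue
-- ===== SOURCE B (Python) =====
-- def parse_dialogue(text):
--     # Pass 1: group lines into (label, [pieces]); pass 2: join each group into a tuple.
--     groups = []
--     for line in text.split('\n'):
--         if line.startswith("Alex:") or line.startswith("Jamie:"):
--             groups.append((line.split(':')[0], [line.split(':', 1)[1].strip()]))
--         elif groups:
--             groups[-1][1].append(line.strip())
--     return [(label, ' '.join(pieces).strip(), 'nova' if label == 'Alex' else 'echo')
--             for label, pieces in groups]
-- ===== Notes on version B (the rewrite author's own statement) =====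
-- stated objective: alternative
-- what changed: Replaces A's one-pass fold with a running string accumulator and flush-on-speaker-change by a two-pass decomposition: first group lines into (label, pieces-list) records, then map each group to its tuple by space-joining the pieces and stripping.
import Mathlib
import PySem

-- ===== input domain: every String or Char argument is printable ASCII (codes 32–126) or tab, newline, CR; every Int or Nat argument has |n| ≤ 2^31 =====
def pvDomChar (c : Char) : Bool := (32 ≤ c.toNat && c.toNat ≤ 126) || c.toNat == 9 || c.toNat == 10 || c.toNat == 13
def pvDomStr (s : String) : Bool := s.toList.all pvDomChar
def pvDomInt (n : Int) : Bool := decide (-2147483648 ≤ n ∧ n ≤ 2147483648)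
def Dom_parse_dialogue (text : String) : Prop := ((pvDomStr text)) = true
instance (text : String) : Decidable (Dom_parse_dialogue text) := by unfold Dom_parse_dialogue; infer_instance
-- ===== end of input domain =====

-- B replaces A's flush-on-speaker-change string accumulator by a two-pass grouping (collect
-- (label, pieces) groups, then join-and-strip each group); same output, same cost (alternative).

-- ===== PORT A =====
-- A's loop body: state = (parsed_dialogue, current_speaker, current_text)
def pvStepA (st : List (String × String × String) × Option String × String) (line : String) :
    List (String × String × String) × Option String × String :=
  if PySem.Str.startswith line "Alex:" || PySem.Str.startswith line "Jamie:" then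
    ((match st.2.1 with
      | some sp => st.1 ++ [(sp, PySem.Str.strip st.2.2, if sp = "Alex" then "nova" else "echo")]
      | none => st.1),
     some ((PySem.List.pyGet? ((PySem.Str.split? line ":").getD []) 0).getD ""),
     PySem.Str.strip ((PySem.List.pyGet? ((PySem.Str.splitMax? line ":" 1).getD []) 1).getD ""))
  else
    (st.1, st.2.1, st.2.2 ++ " " ++ PySem.Str.strip line)

def parse_dialogue (text : String) : List (String × String × String) :=
  let lines := (PySem.Str.split? text "\n").getD []
  let st := lines.foldl pvStepA ([], none, "")
  match st.2.1 with
  | some sp => st.1 ++ [(sp, PySem.Str.strip st.2.2, if sp = "Alex" then "nova" else "echo")]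
  | none => st.1

-- ===== PORT B =====
-- B's pass 1 loop body: groups = list of (label, pieces)
def pvStepB (gs : List (String × List String)) (line : String) : List (String × List String) :=
  if PySem.Str.startswith line "Alex:" || PySem.Str.startswith line "Jamie:" then
    gs ++ [((PySem.List.pyGet? ((PySem.Str.split? line ":").getD []) 0).getD "",
            [PySem.Str.strip ((PySem.List.pyGet? ((PySem.Str.splitMax? line ":" 1).getD []) 1).getD "")])]
  else
    match gs.getLast? with
    | none => gs
    | some g => gs.dropLast ++ [(g.1, g.2 ++ [PySem.Str.strip line])]

-- B's pass 2 body
def pvEmitB (g : String × List String) : String × String × String :=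
  (g.1, PySem.Str.strip (PySem.Str.join " " g.2), if g.1 = "Alex" then "nova" else "echo")

def parse_dialogue_alt (text : String) : List (String × String × String) :=
  let lines := (PySem.Str.split? text "\n").getD []
  (lines.foldl pvStepB []).map pvEmitB

-- ===== PRECONDITION & SPEC =====
def Spec_parse_dialogue (text : String) (out : List (String × String × String)) : Prop := out = parse_dialogue_alt text
instance (text : String) (out : List (String × String × String)) : Decidable (Spec_parse_dialogue text out) := by unfold Spec_parse_dialogue; infer_instance

-- ===== CLAIM (what is proved, stated in full; the proofs are below) =====
def Claim_equal_parse_dialogue : Prop := ∀ (text : String), Dom_parse_dialogue text → Spec_parse_dialogue text (parse_dialogue text)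

-- ===== LEMMAS AND PROOFS =====

-- relation between A's fold state and B's groups list
def pvInv (st : List (String × String × String) × Option String × String)
    (gs : List (String × List String)) : Prop :=
  match st.2.1 with
  | none => gs = [] ∧ st.1 = []
  | some sp => ∃ gs₀ ps, gs = gs₀ ++ [(sp, ps)] ∧ ps ≠ [] ∧ st.1 = gs₀.map pvEmitB ∧
      st.2.2 = PySem.Str.join " " ps

lemma pv_chars_join_append_one (sep : List Char) (ps : List (List Char)) (x : List Char)
    (h : ps ≠ []) :
    PySem.Chars.join sep (ps ++ [x]) = PySem.Chars.join sep ps ++ sep ++ x := by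
  induction ps with
  | nil => exact absurd rfl h
  | cons a t ih =>
    cases t with
    | nil => simp [PySem.Chars.join_cons_cons, PySem.Chars.join_singleton]
    | cons b t' =>
      have h2 := ih (by simp)
      calc PySem.Chars.join sep ((a :: b :: t') ++ [x])
          = a ++ sep ++ PySem.Chars.join sep ((b :: t') ++ [x]) := by
            rw [List.cons_append]
            exact PySem.Chars.join_cons_cons sep a b (t' ++ [x])
        _ = a ++ sep ++ (PySem.Chars.join sep (b :: t') ++ sep ++ x) := by rw [h2]
        _ = PySem.Chars.join sep (a :: b :: t') ++ sep ++ x := by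
            rw [PySem.Chars.join_cons_cons]
            simp [List.append_assoc]

lemma pv_join_append_one (ps : List String) (x : String) (h : ps ≠ []) :
    PySem.Str.join " " (ps ++ [x]) = PySem.Str.join " " ps ++ " " ++ x := by
  apply String.toList_inj.mp
  rw [String.toList_append, String.toList_append, PySem.Str.toList_join, PySem.Str.toList_join,
    List.map_append]
  exact pv_chars_join_append_one " ".toList (ps.map String.toList) x.toList (by simpa using h)

lemma pv_join_singleton (x : String) : PySem.Str.join " " [x] = x := by
  simp [PySem.Str.join]

lemma pvInv_step (st : List (String × String × String) × Option String × String)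
    (gs : List (String × List String)) (line : String) (h : pvInv st gs) :
    pvInv (pvStepA st line) (pvStepB gs line) := by
  obtain ⟨p, cs, ct⟩ := st
  unfold pvStepA pvStepB
  by_cases hs : (PySem.Str.startswith line "Alex:" || PySem.Str.startswith line "Jamie:") = true
  · rw [if_pos hs, if_pos hs]
    cases cs with
    | none =>
      obtain ⟨hgs, hp⟩ := h
      subst hgs hp
      exact ⟨[], [PySem.Str.strip ((PySem.List.pyGet? ((PySem.Str.splitMax? line ":" 1).getD []) 1).getD "")],
        by simp, by simp, rfl, (pv_join_singleton _).symm⟩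
    | some sp =>
      obtain ⟨gs₀, ps, hgs, hne, hp, hct⟩ := h
      subst hgs hp
      refine ⟨gs₀ ++ [(sp, ps)],
        [PySem.Str.strip ((PySem.List.pyGet? ((PySem.Str.splitMax? line ":" 1).getD []) 1).getD "")],
        by simp, by simp, ?_, (pv_join_singleton _).symm⟩
      have hct' : ct = PySem.Str.join " " ps := hct
      simp [pvEmitB, hct']
  · rw [if_neg hs, if_neg hs]
    cases cs with
    | none =>
      obtain ⟨hgs, hp⟩ := h
      subst hgs hp
      exact ⟨rfl, rfl⟩
    | some sp =>
      obtain ⟨gs₀, ps, hgs, hne, hp, hct⟩ := h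
      subst hgs hp
      rw [List.getLast?_concat, List.dropLast_concat]
      exact ⟨gs₀, ps ++ [PySem.Str.strip line], rfl, by simp, rfl, by
        rw [pv_join_append_one ps _ hne, hct]⟩

lemma pvInv_foldl (lines : List String)
    (st : List (String × String × String) × Option String × String)
    (gs : List (String × List String)) (h : pvInv st gs) :
    pvInv (lines.foldl pvStepA st) (lines.foldl pvStepB gs) := by
  induction lines generalizing st gs with
  | nil => exact h
  | cons l t ih => exact ih _ _ (pvInv_step _ _ _ h)

lemma pv_final (st : List (String × String × String) × Option String × String)
    (gs : List (String × List String)) (h : pvInv st gs) :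
    (match st.2.1 with
     | some sp => st.1 ++ [(sp, PySem.Str.strip st.2.2, if sp = "Alex" then "nova" else "echo")]
     | none => st.1) = gs.map pvEmitB := by
  obtain ⟨p, cs, ct⟩ := st
  cases cs with
  | none =>
    obtain ⟨h1, h2⟩ := h
    have h2' : p = [] := h2
    simp only [h1, h2', List.map_nil]
  | some sp =>
    obtain ⟨gs₀, ps, h1, hne, h2, h3⟩ := h
    have h2' : p = gs₀.map pvEmitB := h2
    have h3' : ct = PySem.Str.join " " ps := h3
    simp only [h1, List.map_append, List.map_cons, List.map_nil]
    rw [h2', h3']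
    rfl

-- ===== VERDICT (by name: the statement is the Claim_ definition above) =====
theorem parse_dialogue_spec : Claim_equal_parse_dialogue := by
  intro text _
  unfold Spec_parse_dialogue parse_dialogue parse_dialogue_alt
  exact pv_final _ _ (pvInv_foldl ((PySem.Str.split? text "\n").getD []) ([], none, "") [] ⟨rfl, rfl⟩)
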